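-- pv_equiv track=rewrite | github.com/Ktwsz/wdi-zestaw2 | 13.py | foo
-- ===== SOURCE A (Python) =====
-- def foo(n):
--     a = n%10
--     n //= 10
--     while n > 0:
--         if n % 10 == a:
--             return False
--         n //= 10
--     return True
-- ===== SOURCE B (Python) =====
-- def foo(n):
--     a = n % 10
--     n //= 10
--     counts = {}
--     while n > 0:
--         d = n % 10
--         counts[d] = counts.get(d, 0) + 1
--         n //= 10
--     return counts.get(a, 0) == 0
-- ===== Notes on version B (the rewrite author's own statement) =====
-- stated objective: alternative
-- what changed: A scans the remaining digits with an in-loop equality branch and early return; B makes one full tabulating pass building a digit-frequency dict and decides with a single lookup afterwards.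
import Mathlib
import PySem

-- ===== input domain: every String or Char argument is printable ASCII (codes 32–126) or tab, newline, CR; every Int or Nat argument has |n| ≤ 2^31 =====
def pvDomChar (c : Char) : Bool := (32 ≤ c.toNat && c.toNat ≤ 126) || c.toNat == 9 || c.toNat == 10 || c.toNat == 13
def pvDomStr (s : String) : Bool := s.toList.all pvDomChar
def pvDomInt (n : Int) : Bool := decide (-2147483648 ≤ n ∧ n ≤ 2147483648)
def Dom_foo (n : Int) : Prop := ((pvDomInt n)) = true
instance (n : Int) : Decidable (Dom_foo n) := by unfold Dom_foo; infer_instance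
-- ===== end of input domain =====

-- B replaces A's early-exit digit scan by one full tabulating pass into a counting dict plus a single lookup (alternative decomposition, same cost).

-- ===== PORT A =====
-- while n > 0: if n % 10 == a: return False; n //= 10
def fooLoop (a : Int) (n : Int) : Bool :=
  if _h : 0 < n then
    if PySem.Int.mod n 10 = a then false
    else fooLoop a (PySem.Int.floordiv n 10)
  else true
termination_by n.toNat
decreasing_by
  simp only [PySem.Int.floordiv_eq_ediv_of_pos (a := n) (by norm_num : (0:Int) < 10)]
  omega

def foo (n : Int) : Bool := fooLoop (PySem.Int.mod n 10) (PySem.Int.floordiv n 10)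

-- ===== PORT B =====
-- while n > 0: counts[n%10] = counts.get(n%10,0)+1; n //= 10
def fooAltLoop (n : Int) (counts : PySem.Dict Int Int) : PySem.Dict Int Int :=
  if h : 0 < n then
    fooAltLoop (PySem.Int.floordiv n 10)
      (counts.insert (PySem.Int.mod n 10) (counts.getD (PySem.Int.mod n 10) 0 + 1))
  else counts
termination_by n.toNat
decreasing_by
  simp only [PySem.Int.floordiv_eq_ediv_of_pos (a := n) (by norm_num : (0:Int) < 10)]
  omega

def foo_alt (n : Int) : Bool :=
  let a := PySem.Int.mod n 10
  let counts := fooAltLoop (PySem.Int.floordiv n 10) PySem.Dict.empty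
  counts.getD a 0 == 0

-- ===== PRECONDITION & SPEC =====
def Spec_foo (n : Int) (out : Bool) : Prop := out = foo_alt n
instance (n : Int) (out : Bool) : Decidable (Spec_foo n out) := by unfold Spec_foo; infer_instance

-- ===== CLAIM (what is proved, stated in full; the proofs are below) =====
def Claim_equal_foo : Prop := ∀ (n : Int), Dom_foo n → Spec_foo n (foo n)

-- ===== LEMMAS AND PROOFS =====

-- the tabulating pass never decreases a count
theorem fooAltLoop_getD_mono (n : Int) (c : PySem.Dict Int Int) (a : Int) :
    c.getD a 0 ≤ (fooAltLoop n c).getD a 0 := by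
  by_cases h : 0 < n
  · rw [fooAltLoop, dif_pos h]
    refine le_trans ?_ (fooAltLoop_getD_mono (PySem.Int.floordiv n 10) _ a)
    rw [PySem.Dict.getD_insert]
    split_ifs with he
    · subst he; omega
    · exact le_rfl
  · rw [fooAltLoop, dif_neg h]
termination_by n.toNat
decreasing_by
  simp only [PySem.Int.floordiv_eq_ediv_of_pos (a := n) (by norm_num : (0:Int) < 10)]
  omega

-- A's early-exit scan returns true iff B's tabulating pass leaves a's count unchanged
theorem fooLoop_eq_count (a n : Int) (c : PySem.Dict Int Int) :
    fooLoop a n = ((fooAltLoop n c).getD a 0 == c.getD a 0) := by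
  by_cases h : 0 < n
  · rw [fooLoop, dif_pos h, fooAltLoop, dif_pos h]
    by_cases he : PySem.Int.mod n 10 = a
    · rw [if_pos he, he]
      have hmono := fooAltLoop_getD_mono (PySem.Int.floordiv n 10)
        (c.insert a (c.getD a 0 + 1)) a
      rw [PySem.Dict.getD_insert, if_pos rfl] at hmono
      symm
      simp only [beq_eq_false_iff_ne, ne_eq]
      omega
    · rw [if_neg he]
      rw [fooLoop_eq_count a (PySem.Int.floordiv n 10)
        (c.insert (PySem.Int.mod n 10) (c.getD (PySem.Int.mod n 10) 0 + 1))]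
      rw [PySem.Dict.getD_insert, if_neg (fun hc => he hc.symm)]
  · rw [fooLoop, dif_neg h, fooAltLoop, dif_neg h]
    simp
termination_by n.toNat
decreasing_by
  simp only [PySem.Int.floordiv_eq_ediv_of_pos (a := n) (by norm_num : (0:Int) < 10)]
  omega

-- ===== VERDICT (by name: the statement is the Claim_ definition above) =====
theorem foo_spec : Claim_equal_foo := by
  intro n _
  unfold Spec_foo foo foo_alt
  rw [fooLoop_eq_count (PySem.Int.mod n 10) (PySem.Int.floordiv n 10) PySem.Dict.empty]
  simp [PySem.Dict.getD_empty]
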